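-- pv_equiv track=rewrite | github.com/cruzanstx/daplug | skills/sprint/scripts/sprint.py | _topo_phases
-- ===== SOURCE A (Python) =====
-- def _topo_phases(nodes: list[str], deps: dict[str, list[str]]) -> tuple[list[list[str]], list[str]]:
--     """Kahn levelization. Returns (phases, leftover_cycle_nodes)."""
--     remaining = set(nodes)
--     incoming: dict[str, set[str]] = {n: set(deps.get(n, [])) for n in nodes}
--     phases: list[list[str]] = []
--
--     while remaining:
--         ready = sorted([n for n in remaining if not (incoming.get(n) or set())])
--         if not ready:
--             # cycle or missing deps
--             break
--         phases.append(ready)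
--         for n in ready:
--             remaining.remove(n)
--         for n in remaining:
--             incoming[n] = set(incoming.get(n, set())) - set(ready)
--
--     leftovers = sorted(remaining)
--     return phases, leftovers
-- ===== SOURCE B (Python) =====
-- def _topo_phases(nodes: list[str], deps: dict[str, list[str]]) -> tuple[list[list[str]], list[str]]:
--     """Kahn levelization via indegree counts + reverse adjacency (BFS frontier)."""
--     order = list(dict.fromkeys(nodes))  # distinct nodes, first-occurrence order
--     dep_sets = {n: set(deps.get(n, [])) for n in order}
--     indeg = {n: len(dep_sets[n]) for n in order}
--     out: dict[str, list[str]] = {}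
--     for n in order:
--         for d in dep_sets[n]:
--             out.setdefault(d, []).append(n)
--     frontier = sorted(n for n in order if indeg[n] == 0)
--     phases: list[list[str]] = []
--     while frontier:
--         phases.append(frontier)
--         nxt = []
--         for n in frontier:
--             for m in out.get(n, ()):  # dependents of n inside the node set
--                 indeg[m] -= 1
--                 if indeg[m] == 0:
--                     nxt.append(m)
--         frontier = sorted(nxt)
--     leftovers = sorted(n for n in order if indeg[n] > 0)
--     return phases, leftovers
-- ===== Notes on version B (the rewrite author's own statement) =====
-- stated objective: faster
-- what changed: Replaces A's per-round rebuild (rescan all remaining nodes and subtract the ready set from every remaining node's incoming set each round) with indegree counts plus a reverse-adjacency map built once, decrementing dependents of each finished node and collecting the next frontier directly.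
import Mathlib
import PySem

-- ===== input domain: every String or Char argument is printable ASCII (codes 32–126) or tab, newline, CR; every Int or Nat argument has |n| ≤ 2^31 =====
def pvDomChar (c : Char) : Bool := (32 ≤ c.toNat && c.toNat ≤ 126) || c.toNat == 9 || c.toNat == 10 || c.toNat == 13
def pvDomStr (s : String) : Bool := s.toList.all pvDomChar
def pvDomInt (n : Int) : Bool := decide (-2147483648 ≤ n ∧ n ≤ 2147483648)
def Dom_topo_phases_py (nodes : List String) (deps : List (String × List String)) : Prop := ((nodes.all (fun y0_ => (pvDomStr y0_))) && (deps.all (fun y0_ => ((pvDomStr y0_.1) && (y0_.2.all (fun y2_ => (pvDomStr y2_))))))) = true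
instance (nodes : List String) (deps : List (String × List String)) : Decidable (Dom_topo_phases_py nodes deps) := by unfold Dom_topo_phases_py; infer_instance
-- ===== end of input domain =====

-- B replaces A's per-round incoming-set subtraction and full rescan by indegree counts with a
-- reverse-adjacency map and a BFS frontier (objective: faster; same return value, proved below).


-- ===== PORT A =====
-- deps.get(n, []) : first-match lookup in the association list
def pvDepGet (deps : List (String × List String)) (n : String) : List String :=
  match deps.find? (fun p => p.1 == n) with
  | some p => p.2
  | none => []

-- the while loop of A; fuel bounds the rounds (each productive round removes ≥ 1 node,
-- so |remaining| + 1 rounds always suffice and at exhaustion the state is already final)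
def topoLoopA (fuel : Nat) (remaining : PySem.Set String)
    (incoming : PySem.Dict String (List String))
    (phases : List (List String)) : List (List String) × PySem.Set String :=
  match fuel with
  | 0 => (phases, remaining)
  | fuel + 1 =>
    if remaining.isEmpty then (phases, remaining) else
    let ready := PySem.List.sorted
      (remaining.filter (fun n => (PySem.Dict.getD incoming n []).isEmpty)) (fun x => x) false
    if ready.isEmpty then (phases, remaining) else
    let phases := phases ++ [ready]
    let remaining := ready.foldl (fun r n => PySem.Set.discard r n) remaining
    -- n is always in remaining when removed (ready ⊆ remaining), so Python's set.remove never raises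
    let incoming := remaining.foldl
      (fun d n => PySem.Dict.insert d n
        (PySem.Set.diff (PySem.Set.ofList (PySem.Dict.getD d n [])) (PySem.Set.ofList ready)))
      incoming
    topoLoopA fuel remaining incoming phases

def topo_phases_py (nodes : List String) (deps : List (String × List String)) :
    List (List String) × List String :=
  let remaining : PySem.Set String := PySem.Set.ofList nodes
  let incoming : PySem.Dict String (List String) :=
    nodes.foldl (fun d n => PySem.Dict.insert d n (PySem.Set.ofList (pvDepGet deps n))) PySem.Dict.empty
  let r := topoLoopA (remaining.length + 1) remaining incoming []
  (r.1, PySem.List.sorted r.2 (fun x => x) false)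

-- ===== PORT B =====
-- the while loop of B: pop the frontier, decrement dependents via the reverse map, collect the next frontier
def topoLoopB (out : PySem.Dict String (List String)) (fuel : Nat)
    (indeg : PySem.Dict String Int) (frontier : List String)
    (phases : List (List String)) : List (List String) × PySem.Dict String Int :=
  match fuel with
  | 0 => (phases, indeg)
  | fuel + 1 =>
    if frontier.isEmpty then (phases, indeg) else
    let phases := phases ++ [frontier]
    let st := frontier.foldl
      (fun (st : PySem.Dict String Int × List String) n =>
        (PySem.Dict.getD out n []).foldl
          (fun (st : PySem.Dict String Int × List String) m =>
            let v := PySem.Dict.getD st.1 m 0 - 1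
            (PySem.Dict.insert st.1 m v, if v = 0 then st.2 ++ [m] else st.2))
          st)
      (indeg, ([] : List String))
    topoLoopB out fuel st.1 (PySem.List.sorted st.2 (fun x => x) false) phases

def topo_phases_py_alt (nodes : List String) (deps : List (String × List String)) :
    List (List String) × List String :=
  let order := PySem.List.dedup nodes
  let depSets : PySem.Dict String (List String) :=
    order.foldl (fun d n => PySem.Dict.insert d n (PySem.Set.ofList (pvDepGet deps n))) PySem.Dict.empty
  let indeg : PySem.Dict String Int :=
    order.foldl (fun d n => PySem.Dict.insert d n ((PySem.Dict.getD depSets n []).length : Int)) PySem.Dict.empty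
  let out : PySem.Dict String (List String) :=
    order.foldl
      (fun d n => (PySem.Dict.getD depSets n []).foldl
        (fun d2 dep => PySem.Dict.insert d2 dep (PySem.Dict.getD d2 dep [] ++ [n])) d)
      PySem.Dict.empty
  let frontier := PySem.List.sorted
    (order.filter (fun n => PySem.Dict.getD indeg n 0 == 0)) (fun x => x) false
  let r := topoLoopB out (order.length + 1) indeg frontier []
  (r.1, PySem.List.sorted (order.filter (fun n => decide (0 < PySem.Dict.getD r.2 n 0))) (fun x => x) false)

-- ===== PRECONDITION & SPEC =====
def Spec_topo_phases_py (nodes : List String) (deps : List (String × List String)) (out : List (List String) × List String) : Prop := out = topo_phases_py_alt nodes deps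
instance (nodes : List String) (deps : List (String × List String)) (out : List (List String) × List String) : Decidable (Spec_topo_phases_py nodes deps out) := by unfold Spec_topo_phases_py; infer_instance

-- ===== CLAIM (what is proved, stated in full; the proofs are below) =====
def Claim_equal_topo_phases_py : Prop := ∀ (nodes : List String) (deps : List (String × List String)), Dom_topo_phases_py nodes deps → Spec_topo_phases_py nodes deps (topo_phases_py nodes deps)

-- ===== LEMMAS AND PROOFS =====

-- the set of not-yet-finished nodes, the unfinished dependencies of a node, and the next phase,
-- all as functions of the ghost list `done` of finished nodes
def pvPend (ns done : List String) : List String := ns.filter (fun n => decide (n ∉ done))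
def pvRem (D : String → List String) (done : List String) (n : String) : List String :=
  (D n).filter (fun d => decide (d ∉ done))
def pvFront (ns : List String) (D : String → List String) (done : List String) : List String :=
  PySem.List.sorted ((pvPend ns done).filter (fun n => (pvRem D done n).isEmpty)) (fun x => x) false

-- a fold of key-only inserts is a pointwise table
lemma getD_foldl_insert_fun {ν : Type} (l : List String) (f : String → ν) (dflt : ν) :
    ∀ (d : PySem.Dict String ν) (k : String),
    PySem.Dict.getD (l.foldl (fun d n => d.insert n (f n)) d) k dflt
      = if k ∈ l then f k else PySem.Dict.getD d k dflt := by
  induction l with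
  | nil => simp
  | cons a t ih =>
    intro d k
    simp only [List.foldl_cons, ih, List.mem_cons]
    by_cases hkt : k ∈ t
    · simp [hkt]
    · by_cases hka : k = a
      · subst hka; simp [hkt]
      · simp [hkt, hka, PySem.Dict.getD_insert]

-- a fold of inserts over distinct keys, each reading its own current value
lemma getD_foldl_insert_self_read (l : List String) (hl : l.Nodup)
    (g : String → List String → List String) :
    ∀ (d : PySem.Dict String (List String)) (k : String),
    PySem.Dict.getD (l.foldl (fun d n => d.insert n (g n (PySem.Dict.getD d n []))) d) k []
      = if k ∈ l then g k (PySem.Dict.getD d k []) else PySem.Dict.getD d k [] := by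
  induction l with
  | nil => simp
  | cons a t ih =>
    intro d k
    simp only [List.foldl_cons, List.mem_cons]
    rw [ih (by exact hl.of_cons)]
    by_cases hkt : k ∈ t
    · have hka : k ≠ a := by rintro rfl; exact (List.nodup_cons.mp hl).1 hkt
      simp [hkt, hka, PySem.Dict.getD_insert]
    · by_cases hka : k = a
      · subst hka; simp [hkt]
      · simp [hkt, hka, PySem.Dict.getD_insert]

-- the inner loop building `out`: append n to out[dep] for every dep in a duplicate-free list
lemma getD_foldl_out_inner (S : List String) (hS : S.Nodup) (n : String) :
    ∀ (d : PySem.Dict String (List String)) (k : String),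
    PySem.Dict.getD (S.foldl (fun d2 dep => d2.insert dep (PySem.Dict.getD d2 dep [] ++ [n])) d) k []
      = PySem.Dict.getD d k [] ++ (if k ∈ S then [n] else []) := by
  induction S with
  | nil => simp
  | cons a t ih =>
    intro d k
    simp only [List.foldl_cons, List.mem_cons]
    rw [ih (by exact hS.of_cons)]
    by_cases hkt : k ∈ t
    · have hka : k ≠ a := by rintro rfl; exact (List.nodup_cons.mp hS).1 hkt
      simp [hkt, hka, PySem.Dict.getD_insert]
    · by_cases hka : k = a
      · subst hka; simp [hkt]
      · simp [hkt, hka, PySem.Dict.getD_insert]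

-- the whole reverse-adjacency build: out[k] lists, in node order, the nodes that depend on k
lemma getD_foldl_out (D : String → List String) (hD : ∀ n, (D n).Nodup) (l : List String) :
    ∀ (d : PySem.Dict String (List String)) (k : String),
    PySem.Dict.getD
      (l.foldl (fun d n => (D n).foldl (fun d2 dep => d2.insert dep (PySem.Dict.getD d2 dep [] ++ [n])) d) d) k []
      = PySem.Dict.getD d k [] ++ l.filter (fun n => decide (k ∈ D n)) := by
  induction l with
  | nil => simp
  | cons a t ih =>
    intro d k
    simp only [List.foldl_cons]
    rw [ih, getD_foldl_out_inner (D a) (hD a) a d k]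
    by_cases h : k ∈ D a <;> simp [h]


-- one round of B's decrement loop over the flattened dependent list L:
-- final counts drop by multiplicity, and nxt collects exactly the nodes whose count hits zero
lemma decr_loop (L : List String) :
    ∀ (indeg : PySem.Dict String Int) (acc : List String),
    (∀ m, (L.count m : Int) ≤ PySem.Dict.getD indeg m 0) →
    (∀ m ∈ acc, m ∉ L) → acc.Nodup →
    (∀ m, PySem.Dict.getD
        (L.foldl (fun (st : PySem.Dict String Int × List String) m =>
          let v := PySem.Dict.getD st.1 m 0 - 1
          (PySem.Dict.insert st.1 m v, if v = 0 then st.2 ++ [m] else st.2)) (indeg, acc)).1 m 0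
      = PySem.Dict.getD indeg m 0 - L.count m) ∧
    (∀ m, m ∈ (L.foldl (fun (st : PySem.Dict String Int × List String) m =>
          let v := PySem.Dict.getD st.1 m 0 - 1
          (PySem.Dict.insert st.1 m v, if v = 0 then st.2 ++ [m] else st.2)) (indeg, acc)).2
      ↔ m ∈ acc ∨ (m ∈ L ∧ (L.count m : Int) = PySem.Dict.getD indeg m 0)) ∧
    (L.foldl (fun (st : PySem.Dict String Int × List String) m =>
          let v := PySem.Dict.getD st.1 m 0 - 1
          (PySem.Dict.insert st.1 m v, if v = 0 then st.2 ++ [m] else st.2)) (indeg, acc)).2.Nodup := by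
  induction L with
  | nil => intro indeg acc _ _ h3; exact ⟨by simp, by simp, h3⟩
  | cons a t ih =>
    intro indeg acc h1 h2 h3
    have hcnt : ∀ m : String, List.count m (a :: t) = List.count m t + (if m = a then 1 else 0) := by
      intro m; by_cases hma : m = a
      · subst hma; simp [List.count_cons_self]
      · rw [List.count_cons_of_ne (Ne.symm hma)]; simp [hma]
    simp only [List.foldl_cons]
    set v : Int := PySem.Dict.getD indeg a 0 - 1 with hv
    have h1a : (List.count a t : Int) + 1 ≤ PySem.Dict.getD indeg a 0 := by
      have := h1 a; rw [hcnt a] at this; simp at this; omega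
    have h1' : ∀ m, (List.count m t : Int) ≤ PySem.Dict.getD (PySem.Dict.insert indeg a v) m 0 := by
      intro m; rw [PySem.Dict.getD_insert]
      by_cases hma : m = a
      · subst hma; simp; omega
      · have := h1 m; rw [hcnt m] at this; simp [hma] at this ⊢; omega
    by_cases hz : v = 0
    · have hanott : a ∉ t := by
        rw [← List.count_eq_zero (a := a) (l := t)]
        have hc0 : (List.count a t : Int) = 0 := by omega
        exact_mod_cast hc0
      have hnacc : a ∉ acc := fun h => h2 a h List.mem_cons_self
      rw [if_pos hz]
      obtain ⟨r1, r2, r3⟩ := ih (PySem.Dict.insert indeg a v) (acc ++ [a]) h1'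
        (by intro m hm
            rcases List.mem_append.mp hm with hm | hm
            · exact fun hmt => h2 m hm (List.mem_cons_of_mem a hmt)
            · simp at hm; subst hm; exact hanott)
        (by simp [List.nodup_append, h3]; exact fun x hx hxe => hnacc (hxe ▸ hx))
      refine ⟨?_, ?_, r3⟩
      · intro m
        rw [r1 m, PySem.Dict.getD_insert, hcnt m]
        by_cases hma : m = a
        · subst hma
          have hct : List.count m t = 0 := List.count_eq_zero.mpr hanott
          simp [hct]; omega
        · simp [hma]
      · intro m
        rw [r2 m, PySem.Dict.getD_insert]
        by_cases hma : m = a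
        · subst hma
          have hl : m ∈ acc ++ [m] := List.mem_append.mpr (Or.inr (by simp))
          have hr : m ∈ m :: t ∧ (List.count m (m :: t) : Int) = PySem.Dict.getD indeg m 0 := by
            refine ⟨List.mem_cons_self, ?_⟩
            rw [hcnt m]
            have hct : List.count m t = 0 := List.count_eq_zero.mpr hanott
            simp [hct]; omega
          constructor
          · intro _; exact Or.inr hr
          · intro _; exact Or.inl hl
        · simp [hma, hcnt m]
    · rw [if_neg hz]
      obtain ⟨r1, r2, r3⟩ := ih (PySem.Dict.insert indeg a v) acc h1'
        (fun m hm hmt => h2 m hm (List.mem_cons_of_mem a hmt)) h3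
      refine ⟨?_, ?_, r3⟩
      · intro m
        rw [r1 m, PySem.Dict.getD_insert, hcnt m]
        by_cases hma : m = a
        · subst hma; simp; omega
        · simp [hma]
      · intro m
        rw [r2 m, PySem.Dict.getD_insert]
        by_cases hma : m = a
        · subst hma
          rw [if_pos rfl]
          have hat : ((List.count m t : Int) = v) → m ∈ t := by
            intro hx
            by_contra hnt
            rw [List.count_eq_zero.mpr hnt] at hx; simp at hx; omega
          constructor
          · rintro (h | ⟨hmt, hc⟩)
            · exact Or.inl h
            · refine Or.inr ⟨List.mem_cons_self, ?_⟩
              rw [hcnt m]; simp; omega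
          · rintro (h | ⟨_, hc⟩)
            · exact Or.inl h
            · rw [hcnt m] at hc; simp at hc
              have hx : (List.count m t : Int) = v := by omega
              exact Or.inr ⟨hat hx, hx⟩
        · simp [hma, hcnt m]


-- removing the ready nodes one by one is filtering them out
lemma foldl_discard (rd : List String) :
    ∀ (r : List String), rd.foldl (fun r n => PySem.Set.discard r n) r
      = r.filter (fun x => decide (x ∉ rd)) := by
  induction rd with
  | nil => intro r; simp
  | cons a t ih =>
    intro r
    rw [List.foldl_cons, ih]
    simp only [PySem.Set.discard, List.filter_filter]
    exact List.filter_congr (fun x _ => by by_cases h1 : x = a <;> by_cases h2 : x ∈ t <;> simp [h1, h2])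

-- multiplicity of m in the concatenation of the dependent lists of the frontier
lemma count_flatMap_filter (ns : List String) (hns : ns.Nodup) (D : String → List String)
    (fr : List String) (m : String) :
    (fr.flatMap (fun d => ns.filter (fun n => decide (d ∈ D n)))).count m
      = if m ∈ ns then (fr.filter (fun d => decide (d ∈ D m))).length else 0 := by
  induction fr with
  | nil => simp
  | cons d t ih =>
    simp only [List.flatMap_cons, List.count_append, ih, List.filter_cons]
    have hone : (ns.filter (fun n => decide (d ∈ D n))).count m
        = if m ∈ ns ∧ d ∈ D m then 1 else 0 := by
      by_cases h : m ∈ ns ∧ d ∈ D m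
      · rw [List.count_eq_one_of_mem (hns.filter _)
          (List.mem_filter.mpr ⟨h.1, by simpa using h.2⟩), if_pos h]
      · rw [List.count_eq_zero.mpr (fun hm => h (by
          rcases List.mem_filter.mp hm with ⟨h1, h2⟩; exact ⟨h1, by simpa using h2⟩)), if_neg h]
    rw [hone]
    by_cases hm : m ∈ ns <;> by_cases hd : d ∈ D m <;> simp [hm, hd] <;> omega


-- the simulation: with `done` the ghost list of finished nodes, A's loop state (remaining, incoming)
-- and B's loop state (indeg, frontier) describe the same round, and the two loops return equal answers
lemma sync (ns : List String) (D : String → List String) (out : PySem.Dict String (List String))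
    (hns : ns.Nodup) (hD : ∀ n, (D n).Nodup)
    (hout : ∀ d, PySem.Dict.getD out d [] = ns.filter (fun n => decide (d ∈ D n))) :
    ∀ (fuel : Nat) (done : List String) (incoming : PySem.Dict String (List String))
      (indeg : PySem.Dict String Int) (phases : List (List String)),
    (∀ n ∈ done, ∀ d ∈ D n, d ∈ done) →
    (∀ n ∈ ns, n ∉ done → PySem.Dict.getD incoming n [] = pvRem D done n) →
    (∀ n ∈ ns, PySem.Dict.getD indeg n 0 = ((pvRem D done n).length : Int)) →
    (∀ n, n ∉ ns → PySem.Dict.getD indeg n 0 = 0) →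
    (pvPend ns done).length < fuel →
    (topoLoopA fuel (pvPend ns done) incoming phases).1
      = (topoLoopB out fuel indeg (pvFront ns D done) phases).1 ∧
    PySem.List.sorted (topoLoopA fuel (pvPend ns done) incoming phases).2 (fun x => x) false
      = PySem.List.sorted (ns.filter (fun n => decide (0 < PySem.Dict.getD
          (topoLoopB out fuel indeg (pvFront ns D done) phases).2 n 0))) (fun x => x) false := by
  intro fuel
  induction fuel with
  | zero => intro done incoming indeg phases _ _ _ _ hfuel; omega
  | succ fuel ih =>
    intro done incoming indeg phases hclo hin hindeg hindeg0 hfuel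
    have hpend_nodup : (pvPend ns done).Nodup := hns.filter _
    by_cases hpe : pvPend ns done = []
    · -- remaining is empty: both loops stop at once
      have hfr : pvFront ns D done = [] := by
        rw [pvFront, PySem.List.sorted_eq_nil_iff, hpe]; rfl
      have hdone : ∀ n ∈ ns, n ∈ done := by
        intro n hn
        have := List.filter_eq_nil_iff.mp hpe n hn
        simpa using this
      have hz : ns.filter (fun n => decide (0 < PySem.Dict.getD indeg n 0)) = [] := by
        refine List.filter_eq_nil_iff.mpr (fun n hn => ?_)
        have hrem : pvRem D done n = [] :=
          List.filter_eq_nil_iff.mpr (fun d hd => by simpa using hclo n (hdone n hn) d hd)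
        rw [hindeg n hn, hrem]
        simp
      constructor
      · simp [topoLoopA, topoLoopB, hpe, hfr]
      · simp only [topoLoopA, topoLoopB, hpe, hfr]
        simp [hz]
    · -- remaining nonempty: A recomputes the frontier; it equals B's
      have hready : (pvPend ns done).filter (fun n => (PySem.Dict.getD incoming n []).isEmpty)
          = (pvPend ns done).filter (fun n => (pvRem D done n).isEmpty) := by
        refine List.filter_congr (fun n hn => ?_)
        rcases List.mem_filter.mp hn with ⟨hn1, hn2⟩
        rw [hin n hn1 (by simpa using hn2)]
      by_cases hfe : pvFront ns D done = []
      · -- no ready node: cycle/missing deps, both stop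
        have hfilters : pvPend ns done = ns.filter (fun n => decide (0 < PySem.Dict.getD indeg n 0)) := by
          refine List.filter_congr (fun n hn => ?_)
          by_cases hd : n ∈ done
          · have hrem : pvRem D done n = [] :=
              List.filter_eq_nil_iff.mpr (fun d hdd => by simpa using hclo n hd d hdd)
            rw [hindeg n hn, hrem]
            simp [hd]
          · have hnp : n ∈ pvPend ns done := List.mem_filter.mpr ⟨hn, by simpa using hd⟩
            have := List.filter_eq_nil_iff.mp (by rwa [pvFront, PySem.List.sorted_eq_nil_iff] at hfe) n hnp
            have hrem : pvRem D done n ≠ [] := by simpa [List.isEmpty_iff] using this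
            have : 0 < (pvRem D done n).length := List.length_pos_iff.mpr hrem
            rw [hindeg n hn]
            simp [hd]
            omega
        have hfe' : PySem.List.sorted ((pvPend ns done).filter (fun n => (pvRem D done n).isEmpty))
            (fun x => x) false = [] := by rwa [pvFront] at hfe
        constructor
        · simp [topoLoopA, topoLoopB, List.isEmpty_iff, hready, hfe, hfe']
        · simp only [topoLoopA, topoLoopB, List.isEmpty_iff, hpe, hready]
          simp [hfe, hfe']
          rw [hfilters]
      · -- a nonempty phase: one synchronized round, then the induction hypothesis
        set fr := pvFront ns D done with hfrdef
        have hfr_unfold : pvFront ns D done = PySem.List.sorted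
            ((pvPend ns done).filter (fun n => (pvRem D done n).isEmpty)) (fun x => x) false := rfl
        have hfr_mem : ∀ n, n ∈ fr ↔ n ∈ ns ∧ n ∉ done ∧ pvRem D done n = [] := by
          intro n
          rw [hfrdef, hfr_unfold, PySem.List.mem_sorted, List.mem_filter, pvPend, List.mem_filter]
          simp [List.isEmpty_iff, and_assoc]
        have hfr_nodup : fr.Nodup :=
          List.Perm.nodup (List.Perm.symm (PySem.List.sorted_perm _ _ _)) (hpend_nodup.filter _)
        set done' := done ++ fr with hdone'
        have hpend'_nodup : (pvPend ns done').Nodup := hns.filter _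
        have hsub_fr : ∀ n ∈ fr, n ∈ ns ∧ n ∉ done :=
          fun n hn => ⟨((hfr_mem n).mp hn).1, ((hfr_mem n).mp hn).2.1⟩
        have hclo' : ∀ n ∈ done', ∀ d ∈ D n, d ∈ done' := by
          intro n hn d hd
          rcases List.mem_append.mp hn with h | h
          · exact List.mem_append_left _ (hclo n h d hd)
          · have hrem := ((hfr_mem n).mp h).2.2
            have := List.filter_eq_nil_iff.mp hrem d hd
            exact List.mem_append_left _ (by simpa using this)
        have hpend' : pvPend ns done' = (pvPend ns done).filter (fun n => decide (n ∉ fr)) := by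
          rw [pvPend, pvPend, List.filter_filter]
          exact List.filter_congr (fun n _ => by
            by_cases h1 : n ∈ done <;> by_cases h2 : n ∈ fr <;> simp [h1, h2, hdone'])
        have hremove : fr.foldl (fun r n => PySem.Set.discard r n) (pvPend ns done) = pvPend ns done' := by
          rw [foldl_discard, hpend']
        set incoming' := (pvPend ns done').foldl (fun d n => PySem.Dict.insert d n
            (PySem.Set.diff (PySem.Set.ofList (PySem.Dict.getD d n [])) (PySem.Set.ofList fr))) incoming with hinc'
        have hin' : ∀ n ∈ ns, n ∉ done' → PySem.Dict.getD incoming' n [] = pvRem D done' n := by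
          intro n hn hnd'
          have hnp' : n ∈ pvPend ns done' := List.mem_filter.mpr ⟨hn, by simpa using hnd'⟩
          rw [hinc', getD_foldl_insert_self_read _ hpend'_nodup
            (fun n v => PySem.Set.diff (PySem.Set.ofList v) (PySem.Set.ofList fr)) incoming n, if_pos hnp']
          have hnd : n ∉ done := fun h => hnd' (List.mem_append_left _ h)
          rw [hin n hn hnd, pvRem, PySem.Set.ofList_eq_self_of_nodup _ ((hD n).filter _)]
          simp only [PySem.Set.diff, List.filter_filter, pvRem]
          exact List.filter_congr (fun d _ => by
            by_cases h1 : d ∈ done <;> by_cases h2 : d ∈ fr <;>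
              simp [h1, h2, hdone', List.contains_eq_mem, PySem.Set.mem_ofList])
        set L := fr.flatMap (fun d => PySem.Dict.getD out d []) with hL
        have hLfilter : L = fr.flatMap (fun d => ns.filter (fun n => decide (d ∈ D n))) := by
          rw [hL]; simp only [hout]
        have hcountL : ∀ m, L.count m
            = if m ∈ ns then (fr.filter (fun d => decide (d ∈ D m))).length else 0 := by
          intro m; rw [hLfilter]; exact count_flatMap_filter ns hns D fr m
        have hkey : ∀ m, (fr.filter (fun d => decide (d ∈ D m))).length
            = ((pvRem D done m).filter (fun x => decide (x ∈ fr))).length := by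
          intro m
          refine List.Perm.length_eq ((List.perm_ext_iff_of_nodup (hfr_nodup.filter _)
            (((hD m).filter _).filter _)).mpr ?_)
          intro x
          simp only [List.mem_filter, decide_eq_true_eq]
          constructor
          · rintro ⟨hxf, hxD⟩
            exact ⟨⟨hxD, by simpa using (hsub_fr x hxf).2⟩, by simpa using hxf⟩
          · rintro ⟨⟨hxD, _⟩, hxf⟩
            exact ⟨by simpa using hxf, hxD⟩
        have hsplit : ∀ m, (pvRem D done m).length
            = ((pvRem D done m).filter (fun x => decide (x ∈ fr))).length + (pvRem D done' m).length := by
          intro m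
          have h2 : (pvRem D done m).filter (fun x => !decide (x ∈ fr)) = pvRem D done' m := by
            simp only [pvRem, List.filter_filter]
            exact List.filter_congr (fun d _ => by
              by_cases h1 : d ∈ done <;> by_cases h2 : d ∈ fr <;> simp [h1, h2, hdone'])
          have h1 : (pvRem D done m).length
              = ((pvRem D done m).filter (fun x => decide (x ∈ fr))).length
                + ((pvRem D done m).filter (fun x => !decide (x ∈ fr))).length :=
            List.length_eq_length_filter_add _
          rw [h2] at h1
          exact h1
        have hcount_le : ∀ m, (L.count m : Int) ≤ PySem.Dict.getD indeg m 0 := by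
          intro m
          rw [hcountL m]
          by_cases hm : m ∈ ns
          · rw [if_pos hm, hindeg m hm]
            have h1 := hsplit m
            have h2 := hkey m
            omega
          · rw [if_neg hm, hindeg0 m hm]; simp
        obtain ⟨r1, r2, r3⟩ := decr_loop L indeg [] hcount_le (by simp) List.nodup_nil
        set stp := L.foldl (fun (st : PySem.Dict String Int × List String) m =>
          let v := PySem.Dict.getD st.1 m 0 - 1
          (PySem.Dict.insert st.1 m v, if v = 0 then st.2 ++ [m] else st.2)) (indeg, ([] : List String)) with hstp
        have hindeg1 : ∀ n ∈ ns, PySem.Dict.getD stp.1 n 0 = ((pvRem D done' n).length : Int) := by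
          intro n hn
          rw [r1 n, hindeg n hn, hcountL n, if_pos hn]
          have h1 := hsplit n
          have h2 := hkey n
          omega
        have hindeg10 : ∀ n, n ∉ ns → PySem.Dict.getD stp.1 n 0 = 0 := by
          intro n hn
          rw [r1 n, hindeg0 n hn, hcountL n, if_neg hn]
          simp
        have hmemL : ∀ m, m ∈ L ↔ m ∈ ns ∧ (fr.filter (fun d => decide (d ∈ D m))) ≠ [] := by
          intro m
          rw [hLfilter]
          simp only [List.mem_flatMap, List.mem_filter, decide_eq_true_eq, ne_eq,
            List.filter_eq_nil_iff, decide_eq_true_eq]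
          push Not
          constructor
          · rintro ⟨d, hdf, hmns, hdD⟩
            exact ⟨hmns, d, hdf, hdD⟩
          · rintro ⟨hmns, d, hdf, hdD⟩
            exact ⟨d, hdf, hmns, hdD⟩
        have hnxt_mem : ∀ m, m ∈ stp.2 ↔ m ∈ ns ∧ m ∉ done' ∧ pvRem D done' m = [] := by
          intro m
          rw [r2 m]
          simp only [List.not_mem_nil, false_or]
          constructor
          · rintro ⟨hmL, hc⟩
            have hmns := ((hmemL m).mp hmL).1
            have hfne := ((hmemL m).mp hmL).2
            have hcpos : 0 < (fr.filter (fun d => decide (d ∈ D m))).length :=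
              List.length_pos_iff.mpr hfne
            rw [hcountL m, if_pos hmns, hindeg m hmns] at hc
            have hmd : m ∉ done := by
              intro hmd
              refine hfne (List.filter_eq_nil_iff.mpr (fun d hdf => ?_))
              intro hdec
              exact (hsub_fr d hdf).2 (hclo m hmd d (by simpa using hdec))
            have hmf : m ∉ fr := by
              intro hmf
              have hre : pvRem D done m = [] := ((hfr_mem m).mp hmf).2.2
              rw [hre] at hc
              simp only [List.length_nil, Nat.cast_zero] at hc
              omega
            have h1 := hsplit m
            have h2 := hkey m
            have hlen0 : (pvRem D done' m).length = 0 := by omega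
            exact ⟨hmns, by simp [hdone', hmd, hmf], List.eq_nil_of_length_eq_zero hlen0⟩
          · rintro ⟨hmns, hmd', hrem'⟩
            have hmd : m ∉ done := fun h => hmd' (List.mem_append_left _ h)
            have hmf : m ∉ fr := fun h => hmd' (List.mem_append_right _ h)
            have hremne : pvRem D done m ≠ [] := fun h => hmf ((hfr_mem m).mpr ⟨hmns, hmd, h⟩)
            have hrl : 0 < (pvRem D done m).length := List.length_pos_iff.mpr hremne
            have h1 := hsplit m
            have h2 := hkey m
            have hrem'0 : (pvRem D done' m).length = 0 := by rw [hrem']; rfl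
            have hcpos : 0 < (fr.filter (fun d => decide (d ∈ D m))).length := by omega
            refine ⟨(hmemL m).mpr ⟨hmns, fun h => by rw [h] at hcpos; simp at hcpos⟩, ?_⟩
            rw [hcountL m, if_pos hmns, hindeg m hmns]
            omega
        have hsort : PySem.List.sorted stp.2 (fun x => x) false = pvFront ns D done' := by
          rw [show pvFront ns D done' = PySem.List.sorted
            ((pvPend ns done').filter (fun n => (pvRem D done' n).isEmpty)) (fun x => x) false from rfl]
          refine PySem.List.sorted_eq_sorted_of_perm _ _ (fun x => x) (fun a b h => h) ?_
          refine (List.perm_ext_iff_of_nodup r3 (hpend'_nodup.filter _)).mpr (fun m => ?_)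
          rw [hnxt_mem m]
          simp only [List.mem_filter, pvPend, List.isEmpty_iff, decide_eq_true_eq]
          tauto
        have hfrne : fr ≠ [] := hfe
        have hfuel' : (pvPend ns done').length < fuel := by
          rcases List.exists_mem_of_ne_nil fr hfrne with ⟨x, hx⟩
          have hxp : x ∈ pvPend ns done :=
            List.mem_filter.mpr ⟨(hsub_fr x hx).1, by simpa using (hsub_fr x hx).2⟩
          have hlt : (pvPend ns done').length < (pvPend ns done).length := by
            rw [hpend']
            exact List.length_filter_lt_length_iff_exists.mpr ⟨x, hxp, by simp [hx]⟩
          have hle : (pvPend ns done).length ≤ fuel := by omega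
          omega
        have hA : topoLoopA (fuel+1) (pvPend ns done) incoming phases
            = topoLoopA fuel (pvPend ns done') incoming' (phases ++ [fr]) := by
          simp only [topoLoopA]
          rw [if_neg (by simpa [List.isEmpty_iff] using hpe), hready, ← hfr_unfold, ← hfrdef,
            if_neg (by simpa [List.isEmpty_iff] using hfrne), hremove]
        have hB : topoLoopB out (fuel+1) indeg fr phases
            = topoLoopB out fuel stp.1 (PySem.List.sorted stp.2 (fun x => x) false) (phases ++ [fr]) := by
          simp only [topoLoopB]
          rw [if_neg (by simpa [List.isEmpty_iff] using hfrne), ← List.foldl_flatMap, ← hL, ← hstp]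
        rw [hA, hB, hsort]
        exact ih done' incoming' stp.1 (phases ++ [fr]) hclo' hin' hindeg1 hindeg10 hfuel' 

-- ===== VERDICT (by name: the statement is the Claim_ definition above) =====
-- assembling: the initial states of the two programs satisfy the simulation invariant at done = []
theorem topo_phases_py_spec : Claim_equal_topo_phases_py := by
  intro nodes deps _
  unfold Spec_topo_phases_py
  simp only [topo_phases_py, topo_phases_py_alt, PySem.List.dedup_eq_ofList]
  set ns := PySem.Set.ofList nodes with hns_def
  set D : String → List String := fun n => PySem.Set.ofList (pvDepGet deps n) with hD_def
  have hns : ns.Nodup := PySem.Set.nodup_ofList nodes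
  have hD : ∀ n, (D n).Nodup := fun n => PySem.Set.nodup_ofList _
  -- the three dictionaries built up front
  set incoming := nodes.foldl (fun d n => PySem.Dict.insert d n (PySem.Set.ofList (pvDepGet deps n)))
    PySem.Dict.empty with hinc_def
  set depSets := ns.foldl (fun d n => PySem.Dict.insert d n (PySem.Set.ofList (pvDepGet deps n)))
    PySem.Dict.empty with hds_def
  set indeg := ns.foldl (fun d n => PySem.Dict.insert d n ((PySem.Dict.getD depSets n []).length : Int))
    PySem.Dict.empty with hidg_def
  set out := ns.foldl
      (fun d n => (PySem.Dict.getD depSets n []).foldl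
        (fun d2 dep => PySem.Dict.insert d2 dep (PySem.Dict.getD d2 dep [] ++ [n])) d)
      PySem.Dict.empty with hout_def
  have hds : ∀ k, PySem.Dict.getD depSets k [] = if k ∈ ns then D k else [] := by
    intro k
    rw [hds_def, getD_foldl_insert_fun ns (fun n => PySem.Set.ofList (pvDepGet deps n)) []]
    simp [hD_def]
  have hout : ∀ d, PySem.Dict.getD out d [] = ns.filter (fun n => decide (d ∈ D n)) := by
    intro d
    have hsame : out = ns.foldl
        (fun d n => (D n).foldl (fun d2 dep => PySem.Dict.insert d2 dep (PySem.Dict.getD d2 dep [] ++ [n])) d)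
        PySem.Dict.empty := by
      rw [hout_def]
      have hcg : ∀ (acc : PySem.Dict String (List String)) (x : String), x ∈ ns →
          (PySem.Dict.getD depSets x []).foldl
            (fun d2 dep => PySem.Dict.insert d2 dep (PySem.Dict.getD d2 dep [] ++ [x])) acc
          = (D x).foldl (fun d2 dep => PySem.Dict.insert d2 dep (PySem.Dict.getD d2 dep [] ++ [x])) acc := by
        intro acc x hx; rw [hds x, if_pos hx]
      exact PySem.List.foldl_congr_mem _ _ _ _ hcg
    rw [hsame, getD_foldl_out D hD ns PySem.Dict.empty d]
    simp
  have hin : ∀ n ∈ ns, n ∉ ([] : List String) → PySem.Dict.getD incoming n [] = pvRem D ([] : List String) n := by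
    intro n hn _
    rw [hinc_def, getD_foldl_insert_fun nodes (fun n => PySem.Set.ofList (pvDepGet deps n)) []]
    rw [if_pos (by rwa [hns_def, PySem.Set.mem_ofList] at hn)]
    simp [pvRem, hD_def]
  have hindeg : ∀ n ∈ ns, PySem.Dict.getD indeg n 0 = ((pvRem D ([] : List String) n).length : Int) := by
    intro n hn
    rw [hidg_def, getD_foldl_insert_fun ns (fun n => ((PySem.Dict.getD depSets n []).length : Int)) 0,
      if_pos hn, hds n, if_pos hn]
    simp [pvRem]
  have hindeg0 : ∀ n, n ∉ ns → PySem.Dict.getD indeg n 0 = 0 := by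
    intro n hn
    rw [hidg_def, getD_foldl_insert_fun ns (fun n => ((PySem.Dict.getD depSets n []).length : Int)) 0,
      if_neg hn]
    simp
  have hpend0 : pvPend ns ([] : List String) = ns := by simp [pvPend]
  have hfront0 : PySem.List.sorted (ns.filter (fun n => PySem.Dict.getD indeg n 0 == 0)) (fun x => x) false
      = pvFront ns D ([] : List String) := by
    rw [pvFront, hpend0]
    congr 1
    refine List.filter_congr (fun n hn => ?_)
    rw [hindeg n hn, Bool.eq_iff_iff]
    simp [pvRem, List.isEmpty_iff, List.length_eq_zero_iff]
  obtain ⟨e1, e2⟩ := sync ns D out hns hD hout (ns.length + 1) ([] : List String) incoming indeg []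
    (by simp) hin hindeg hindeg0 (by rw [hpend0]; omega)
  rw [hpend0] at e1 e2
  rw [← hfront0] at e1 e2
  exact Prod.ext e1 e2
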